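-- pv_equiv track=rewrite | github.com/gem-pasteur/macsyfinder | macsypy/config_new.py | _str_2_tuple
-- ===== SOURCE A (Python) =====
-- def _str_2_tuple(value):
--     """
--     transform a string with syntax  {model_fqn int} n in list of tuple
--     :param str value: the string to parse
--     :return:
--     :rtype: [(model_fqn, int), ...]
--     """
--     try:
--         it = iter(value.split())
--         res = [(a, next(it)) for a in it]
--         return res
--     except StopIteration:
--         raise ValueError("You must provide a list of model name and"
--                          " value separated by spaces: {}".format(value))
-- ===== SOURCE B (Python) =====
-- def _str_2_tuple(value):
--     tokens = value.split()
--     if len(tokens) % 2: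
--         raise ValueError("You must provide a list of model name and"
--                          " value separated by spaces: {}".format(value))
--     return [(tokens[i], tokens[i + 1]) for i in range(0, len(tokens), 2)]
-- ===== Notes on version B (the rewrite author's own statement) =====
-- stated objective: simpler
-- what changed: Replaces A's iterator-consuming comprehension with StopIteration-to-ValueError conversion by an explicit parity guard followed by an index-based comprehension over range(0, len, 2).
import Mathlib
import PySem

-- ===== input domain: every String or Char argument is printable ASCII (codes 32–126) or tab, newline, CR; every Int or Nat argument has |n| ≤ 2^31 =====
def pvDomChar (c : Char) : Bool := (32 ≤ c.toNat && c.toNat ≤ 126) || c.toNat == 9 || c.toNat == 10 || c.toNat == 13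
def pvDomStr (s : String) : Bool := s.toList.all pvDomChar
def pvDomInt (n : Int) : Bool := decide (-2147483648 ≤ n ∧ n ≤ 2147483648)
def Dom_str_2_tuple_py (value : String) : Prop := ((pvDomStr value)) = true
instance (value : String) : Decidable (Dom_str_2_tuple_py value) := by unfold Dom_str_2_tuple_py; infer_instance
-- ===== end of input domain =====

-- B replaces A's iterator-consuming pairing comprehension by a parity guard plus
-- an index-based comprehension over range(0, len, 2); objective: simpler.


-- ===== PORT A =====
-- 'it = iter(value.split()); [(a, next(it)) for a in it]' pairs consecutive tokens;
-- a lone trailing token means next(it) raises StopIteration → ValueError (excluded by Pre_).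
def pairIter : List String → List (String × String)
  | a :: b :: rest => (a, b) :: pairIter rest
  | _ => []  -- [] : empty comprehension; [a] : StopIteration → ValueError, outside Pre_

def str_2_tuple_py (value : String) : List (String × String) :=
  pairIter (PySem.Str.split₀ value)

-- ===== PORT B =====
-- tokens = value.split(); parity guard (raise, outside Pre_);
-- [(tokens[i], tokens[i+1]) for i in range(0, len(tokens), 2)]
def str_2_tuple_py_alt (value : String) : List (String × String) :=
  let tokens := PySem.Str.split₀ value
  if tokens.length % 2 ≠ 0 then []  -- raise ValueError, outside Pre_
  else
    (PySem.List.pyRange 0 tokens.length 2).map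
      (fun i => (PySem.List.pyGetD tokens i "", PySem.List.pyGetD tokens (i + 1) ""))

-- ===== PRECONDITION & SPEC =====
-- Pre_ excludes exactly the inputs with an odd number of whitespace-separated tokens,
-- on which both A and B raise ValueError (with the same message).
def Pre_str_2_tuple_py (value : String) : Prop :=
  (PySem.Str.split₀ value).length % 2 = 0
instance (value : String) : Decidable (Pre_str_2_tuple_py value) := by
  unfold Pre_str_2_tuple_py; infer_instance

def pvWitness_str_2_tuple_py : String := "TXSS 3 Flag 12"

def Spec_str_2_tuple_py (value : String) (out : List (String × String)) : Prop :=
  out = str_2_tuple_py_alt value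
instance (value : String) (out : List (String × String)) : Decidable (Spec_str_2_tuple_py value out) := by
  unfold Spec_str_2_tuple_py; infer_instance

-- ===== CLAIM (what is proved, stated in full; the proofs are below) =====
def Claim_equal_str_2_tuple_py : Prop :=
  ∀ (value : String), Dom_str_2_tuple_py value → Pre_str_2_tuple_py value →
    Spec_str_2_tuple_py value (str_2_tuple_py value)

-- ===== LEMMAS AND PROOFS =====

-- indexing pairs out of a list of length 2*m reproduces consecutive pairing
theorem pairIter_eq_index (m : Nat) : ∀ (ts : List String), ts.length = 2 * m →
    (List.range m).map
      (fun (k : Nat) => (PySem.List.pyGetD ts (0 + 2 * (k : Int)) "",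
                 PySem.List.pyGetD ts (0 + 2 * (k : Int) + 1) "")) = pairIter ts := by
  induction m with
  | zero =>
    intro ts h
    have : ts = [] := List.eq_nil_of_length_eq_zero (by omega)
    subst this; simp [pairIter]
  | succ m ih =>
    intro ts h
    match ts with
    | a :: b :: rest =>
      have hr : rest.length = 2 * m := by simp at h; omega
      rw [List.range_succ_eq_map, List.map_cons, List.map_map, pairIter]
      congr 1
      · have e0 : ((0:Int) + 2 * ((0:Nat):Int)) = ((0:Nat):Int) := by norm_num
        have e1 : (((0:Nat):Int) + 1) = ((1:Nat):Int) := by norm_num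
        rw [e0, e1, PySem.List.pyGetD_natCast, PySem.List.pyGetD_natCast]
        simp [List.getD]
      · rw [← ih rest hr]
        apply List.map_congr_left
        intro k _
        have h1 : (0 + 2 * ((k + 1 : Nat) : Int)) = ((2 * k + 2 : Nat) : Int) := by push_cast; ring
        have h2 : (((2 * k + 2 : Nat) : Int) + 1) = ((2 * k + 3 : Nat) : Int) := by push_cast; ring
        have h3 : (0 + 2 * (k : Int)) = ((2 * k : Nat) : Int) := by push_cast; ring
        have h4 : (((2 * k : Nat) : Int) + 1) = ((2 * k + 1 : Nat) : Int) := by push_cast; ring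
        simp only [Function.comp, h1, h2, h3, h4, PySem.List.pyGetD_natCast]
        simp [List.getD]
    | [a] => simp at h; omega
    | [] => simp at h

-- ===== VERDICT (by name: the statement is the Claim_ definition above) =====
theorem str_2_tuple_py_spec : Claim_equal_str_2_tuple_py := by
  intro value _ hpre
  unfold Spec_str_2_tuple_py str_2_tuple_py str_2_tuple_py_alt
  unfold Pre_str_2_tuple_py at hpre
  set ts := PySem.Str.split₀ value with hts
  simp only [hpre, ne_eq, not_true_eq_false, reduceIte]
  obtain ⟨m, hm⟩ : ∃ m, ts.length = 2 * m := ⟨ts.length / 2, by omega⟩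
  rw [PySem.List.pyRange_of_pos 0 (ts.length : Int) (by norm_num), List.map_map]
  simp only [Function.comp_def]
  have hcount : (if (0 : Int) < (ts.length : Int)
      then (((ts.length : Int) - 0 + 2 - 1) / 2).toNat else 0) = m := by
    split_ifs with h
    · omega
    · omega
  rw [hcount]
  exact (pairIter_eq_index m ts hm).symm
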